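-- pv_equiv track=rewrite | github.com/zuanming/orion_v0 | src/core/response_enhancer.py | _already_has_uncertainty
-- ===== SOURCE A (Python) =====
-- def _already_has_uncertainty(response: str) -> bool:
--     """Check if response already expresses uncertainty"""
--     uncertainty_markers = [
--         'i think', 'probably', 'maybe', 'not sure',
--         'might be', 'could be', 'seems like',
--         'if i recall', 'i believe'
--     ]
--     response_lower = response.lower()
--     return any(marker in response_lower for marker in uncertainty_markers)
-- ===== SOURCE B (Python) =====
-- def _already_has_uncertainty(response: str) -> bool:
--     """Check if response already expresses uncertainty"""
--     markers = (
--         'i think', 'probably', 'maybe', 'not sure',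
--         'might be', 'could be', 'seems like',
--         'if i recall', 'i believe'
--     )
--     s = response.lower()
--     for i in range(len(s)):
--         for m in markers:
--             if s.startswith(m, i):
--                 return True
--     return False
-- ===== Notes on version B (the rewrite author's own statement) =====
-- stated objective: alternative
-- what changed: Replaces nine independent whole-string substring scans combined by any() with a single left-to-right scan over the lowered string that tests at each position whether some marker begins there.
import Mathlib
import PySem

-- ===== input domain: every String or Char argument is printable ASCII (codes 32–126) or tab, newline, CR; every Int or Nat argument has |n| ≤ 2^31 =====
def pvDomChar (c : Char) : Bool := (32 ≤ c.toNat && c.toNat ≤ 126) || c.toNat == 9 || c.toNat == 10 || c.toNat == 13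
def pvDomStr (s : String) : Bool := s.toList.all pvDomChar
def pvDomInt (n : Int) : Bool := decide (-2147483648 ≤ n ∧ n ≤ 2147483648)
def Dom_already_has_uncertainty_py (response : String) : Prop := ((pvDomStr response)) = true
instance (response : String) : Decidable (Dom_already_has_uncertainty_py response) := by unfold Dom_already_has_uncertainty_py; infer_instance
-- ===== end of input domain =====

-- B replaces nine independent substring scans (any(marker in s)) by a single left-to-right
-- scan of the lowered string, testing at each position whether some marker begins there.


-- ===== PORT A =====
def already_has_uncertainty_py (response : String) : Bool :=
  let uncertainty_markers : List String :=
    ["i think", "probably", "maybe", "not sure",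
     "might be", "could be", "seems like",
     "if i recall", "i believe"]
  let response_lower := PySem.Str.lower response
  uncertainty_markers.any (fun marker => PySem.Str.isIn marker response_lower)

-- ===== PORT B =====
def pvMarkersB : List (List Char) :=
  ["i think".toList, "probably".toList, "maybe".toList, "not sure".toList,
   "might be".toList, "could be".toList, "seems like".toList,
   "if i recall".toList, "i believe".toList]

-- the single scan: at each position of the lowered string, test whether some marker starts there
def pvScanB : List Char → Bool
  | [] => false
  | c :: rest =>
    if pvMarkersB.any (fun m => PySem.Chars.startswith (c :: rest) m) then true
    else pvScanB rest

def already_has_uncertainty_py_alt (response : String) : Bool :=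
  pvScanB (PySem.Chars.lower response.toList)

-- ===== PRECONDITION & SPEC =====
def Spec_already_has_uncertainty_py (response : String) (out : Bool) : Prop := out = already_has_uncertainty_py_alt response
instance (response : String) (out : Bool) : Decidable (Spec_already_has_uncertainty_py response out) := by unfold Spec_already_has_uncertainty_py; infer_instance

-- ===== CLAIM (what is proved, stated in full; the proofs are below) =====
def Claim_equal_already_has_uncertainty_py : Prop := ∀ (response : String), Dom_already_has_uncertainty_py response → Spec_already_has_uncertainty_py response (already_has_uncertainty_py response)

-- ===== LEMMAS AND PROOFS =====

lemma pvMarkersB_ne_nil : ∀ m ∈ pvMarkersB, m ≠ [] := by decide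

lemma pvScanB_true_iff (s : List Char) :
    pvScanB s = true ↔ ∃ m ∈ pvMarkersB, m <:+: s := by
  induction s with
  | nil =>
    constructor
    · intro h; exact absurd h (by simp [pvScanB])
    · rintro ⟨m, hm, hinf⟩
      exact absurd (List.infix_nil.mp hinf) (pvMarkersB_ne_nil _ hm)
  | cons c rest ih =>
    rw [pvScanB]
    by_cases h : pvMarkersB.any (fun m => PySem.Chars.startswith (c :: rest) m) = true
    · rw [if_pos h]
      constructor
      · intro _
        obtain ⟨m, hm, hpre⟩ := List.any_eq_true.mp h
        exact ⟨m, hm, ((PySem.Chars.startswith_iff _ _).mp hpre).isInfix⟩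
      · intro _; rfl
    · rw [if_neg h, ih]
      constructor
      · rintro ⟨m, hm, hinf⟩; exact ⟨m, hm, hinf.trans (List.suffix_cons c rest).isInfix⟩
      · rintro ⟨m, hm, hinf⟩
        rcases List.infix_cons_iff.mp hinf with hpre | htail
        · exact absurd (List.any_eq_true.mpr ⟨m, hm, (PySem.Chars.startswith_iff _ _).mpr hpre⟩) h
        · exact ⟨m, hm, htail⟩

-- ===== VERDICT (by name: the statement is the Claim_ definition above) =====
theorem already_has_uncertainty_py_spec : Claim_equal_already_has_uncertainty_py := by
  intro response _
  show already_has_uncertainty_py response = already_has_uncertainty_py_alt response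
  unfold already_has_uncertainty_py already_has_uncertainty_py_alt
  have hmap : pvMarkersB =
      (["i think", "probably", "maybe", "not sure",
        "might be", "could be", "seems like",
        "if i recall", "i believe"] : List String).map String.toList := rfl
  rw [Bool.eq_iff_iff, List.any_eq_true, pvScanB_true_iff, hmap]
  constructor
  · rintro ⟨marker, hm, hin⟩
    exact ⟨marker.toList, List.mem_map_of_mem hm,
      by simpa [PySem.Str.toList_lower] using (PySem.Str.isIn_iff_infix _ _).mp hin⟩
  · rintro ⟨m, hmm, hinf⟩
    obtain ⟨marker, hm, rfl⟩ := List.mem_map.mp hmm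
    exact ⟨marker, hm,
      (PySem.Str.isIn_iff_infix _ _).mpr (by simpa [PySem.Str.toList_lower] using hinf)⟩
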